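-- pv_equiv track=rewrite | github.com/nankotsu-ballista/hato_vol2 | arb_bot.py | split_base_quote
-- ===== SOURCE A (Python) =====
-- from typing import Dict, Tuple, List, Optional
--
-- def split_base_quote(sym: str, allowed: set) -> Tuple[str,str]:
--     s = sym.upper().replace("-", "").replace("_", "").replace("/", "")
--     for q in sorted(allowed, key=len, reverse=True):
--         if s.endswith(q):
--             base = s[:-len(q)]
--             if base:
--                 return base, q
--     return "", ""
-- ===== SOURCE B (Python) =====
-- def split_base_quote(sym: str, allowed: set):
--     s = sym.upper().replace("-", "").replace("_", "").replace("/", "")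
--     best = ""
--     for q in allowed:
--         if len(best) < len(q) < len(s) and s.endswith(q):
--             best = q
--     if not best:
--         return "", ""
--     return s[:-len(best)], best
-- ===== Notes on version B (the rewrite author's own statement) =====
-- stated objective: simpler
-- what changed: Replaced the length-descending sort plus early-return suffix scan with a single unordered pass over allowed that keeps the longest matching quote seen so far (a running max), relying on the fact that equal-length suffixes of the same string are identical.
import Mathlib
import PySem

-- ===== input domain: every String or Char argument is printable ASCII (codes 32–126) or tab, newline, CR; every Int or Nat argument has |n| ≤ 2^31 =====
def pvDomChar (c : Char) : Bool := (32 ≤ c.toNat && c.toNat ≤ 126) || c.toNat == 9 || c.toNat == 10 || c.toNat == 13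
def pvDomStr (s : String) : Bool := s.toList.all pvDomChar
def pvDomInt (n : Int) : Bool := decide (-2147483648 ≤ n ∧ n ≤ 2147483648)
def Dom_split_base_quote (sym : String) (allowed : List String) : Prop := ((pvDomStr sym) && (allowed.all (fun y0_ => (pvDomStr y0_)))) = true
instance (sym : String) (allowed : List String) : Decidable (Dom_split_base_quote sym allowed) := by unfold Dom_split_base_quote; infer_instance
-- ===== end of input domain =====

-- B replaces A's sort-then-first-match suffix scan by a single unordered longest-match pass (objective: simpler).

-- ===== PORT A =====
-- A's for-loop over the sorted quotes, with its two early returns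
def pvALoop (s : String) : List String → String × String
  | [] => ("", "")
  | q :: rest =>
    if PySem.Str.endswith s q then
      let base := PySem.Str.slice s none (some (-(q.length : Int)))
      if base ≠ "" then (base, q) else pvALoop s rest
    else pvALoop s rest

def split_base_quote (sym : String) (allowed : List String) : String × String :=
  let s := PySem.Str.replace (PySem.Str.replace (PySem.Str.replace (PySem.Str.upper sym) "-" "") "_" "") "/" ""
  pvALoop s (PySem.List.sorted allowed (fun q => PySem.Str.len q) true)

-- ===== PORT B =====
-- B's running-max accumulation loop
def pvBestFold (s : String) (allowed : List String) : String :=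
  allowed.foldl
    (fun best q =>
      if PySem.Str.len best < PySem.Str.len q ∧ PySem.Str.len q < PySem.Str.len s ∧
          PySem.Str.endswith s q = true then q else best) ""

def split_base_quote_alt (sym : String) (allowed : List String) : String × String :=
  let s := PySem.Str.replace (PySem.Str.replace (PySem.Str.replace (PySem.Str.upper sym) "-" "") "_" "") "/" ""
  let best := pvBestFold s allowed
  if best = "" then ("", "")
  else (PySem.Str.slice s none (some (-(best.length : Int))), best)

-- ===== PRECONDITION & SPEC =====
def Spec_split_base_quote (sym : String) (allowed : List String) (out : String × String) : Prop := out = split_base_quote_alt sym allowed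
instance (sym : String) (allowed : List String) (out : String × String) : Decidable (Spec_split_base_quote sym allowed out) := by unfold Spec_split_base_quote; infer_instance

-- ===== CLAIM (what is proved, stated in full; the proofs are below) =====
def Claim_equal_split_base_quote : Prop := ∀ (sym : String) (allowed : List String), Dom_split_base_quote sym allowed → Spec_split_base_quote sym allowed (split_base_quote sym allowed)

-- ===== LEMMAS AND PROOFS =====

-- "q is a usable quote for s": a nonempty proper suffix
abbrev pvGood (s q : String) : Prop :=
  0 < q.length ∧ q.length < s.length ∧ PySem.Str.endswith s q = true

theorem pvStr_eq_empty_iff (t : String) : t = "" ↔ t.toList = [] := by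
  constructor
  · rintro rfl; rfl
  · intro h
    have := congrArg String.ofList h
    simpa using this

theorem pvLen_toList (t : String) : t.toList.length = t.length := by
  simp

theorem pvStrLen (t : String) : PySem.Str.len t = t.length := by
  simp

theorem pvBase_ne_iff (s q : String) (h : PySem.Str.endswith s q = true) :
    PySem.Str.slice s none (some (-(q.length : Int))) ≠ "" ↔ pvGood s q := by
  have hL := pvLen_toList s
  rw [Ne, pvStr_eq_empty_iff]
  have ht : (PySem.Str.slice s none (some (-(q.length : Int)))).toList
      = PySem.List.slice s.toList none (some (-(q.length : Int))) := by
    simp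
  rw [ht]
  rcases Nat.eq_zero_or_pos q.length with h0 | h0
  · rw [h0]
    norm_num [PySem.List.slice_to, pvGood, h0]
  · rw [PySem.List.slice_to_neg_natCast s.toList q.length h0]
    simp only [List.take_eq_nil_iff, not_or, pvGood, h, and_true]
    constructor
    · rintro ⟨h1, h2⟩
      have hlen : s.toList.length ≠ 0 := by
        simpa [List.length_eq_zero_iff] using h2
      omega
    · intro hlt
      have hpos : 0 < s.toList.length := by omega
      refine ⟨by omega, ?_⟩
      intro hnil
      rw [hnil] at hpos
      simp at hpos

theorem pvSuffix_of_good (s q : String) (h : pvGood s q) : q.toList <:+ s.toList := by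
  have e := h.2.2
  rw [PySem.Str.endswith_eq, PySem.Chars.endswith_iff] at e
  exact e

theorem pvGood_eq_of_length (s q₁ q₂ : String) (h₁ : pvGood s q₁) (h₂ : pvGood s q₂)
    (h : q₁.length = q₂.length) : q₁ = q₂ := by
  obtain ⟨t₁, ht₁⟩ := pvSuffix_of_good s q₁ h₁
  obtain ⟨t₂, ht₂⟩ := pvSuffix_of_good s q₂ h₂
  have hb : q₁.toList.length = q₂.toList.length := by
    rw [pvLen_toList, pvLen_toList, h]
  have heq : q₁.toList = q₂.toList := (List.append_inj' (ht₁.trans ht₂.symm) hb).2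
  have := congrArg String.ofList heq
  simpa using this

-- A's loop returns the first usable quote (of the list it is given)
theorem pvALoop_eq_find? (s : String) (l : List String) :
    pvALoop s l = (match l.find? (fun q => decide (pvGood s q)) with
      | some q => (PySem.Str.slice s none (some (-(q.length : Int))), q)
      | none => ("", "")) := by
  induction l with
  | nil => rfl
  | cons q rest ih =>
    by_cases hg : pvGood s q
    · have he : PySem.Str.endswith s q = true := hg.2.2
      have hb : PySem.Str.slice s none (some (-(q.length : Int))) ≠ "" :=
        (pvBase_ne_iff s q he).2 hg
      have heC : PySem.Chars.endswith s.toList q.toList = true := by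
        rw [← PySem.Str.endswith_eq]; exact he
      simp [pvALoop, heC, hb, hg]
    · by_cases he : PySem.Str.endswith s q = true
      · have hb : ¬ (PySem.Str.slice s none (some (-(q.length : Int))) ≠ "") :=
          fun hne => hg ((pvBase_ne_iff s q he).1 hne)
        simp only [pvALoop, he, if_true, hb, if_false]
        have hskip : List.find? (fun x => decide (pvGood s x)) (q :: rest)
            = List.find? (fun x => decide (pvGood s x)) rest :=
          List.find?_cons_of_neg (fun h => hg (of_decide_eq_true h))
        rw [ih, hskip]
      · have he' : PySem.Str.endswith s q = false := by
          cases hx : PySem.Str.endswith s q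
          · rfl
          · exact absurd hx he
        simp only [pvALoop, he', Bool.false_eq_true, if_false]
        have hskip : List.find? (fun x => decide (pvGood s x)) (q :: rest)
            = List.find? (fun x => decide (pvGood s x)) rest :=
          List.find?_cons_of_neg (fun h => hg (of_decide_eq_true h))
        rw [ih, hskip]

-- B's fold invariant
theorem pvFold_inv (s : String) (l : List String) (acc : String) :
    (l.foldl (fun best q =>
      if PySem.Str.len best < PySem.Str.len q ∧ PySem.Str.len q < PySem.Str.len s ∧
          PySem.Str.endswith s q = true then q else best) acc = acc ∨
      (l.foldl (fun best q =>
        if PySem.Str.len best < PySem.Str.len q ∧ PySem.Str.len q < PySem.Str.len s ∧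
            PySem.Str.endswith s q = true then q else best) acc ∈ l ∧
       pvGood s (l.foldl (fun best q =>
        if PySem.Str.len best < PySem.Str.len q ∧ PySem.Str.len q < PySem.Str.len s ∧
            PySem.Str.endswith s q = true then q else best) acc))) ∧
    (∀ q ∈ l, pvGood s q → q.length ≤ (l.foldl (fun best q =>
      if PySem.Str.len best < PySem.Str.len q ∧ PySem.Str.len q < PySem.Str.len s ∧
          PySem.Str.endswith s q = true then q else best) acc).length) ∧
    acc.length ≤ (l.foldl (fun best q =>
      if PySem.Str.len best < PySem.Str.len q ∧ PySem.Str.len q < PySem.Str.len s ∧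
          PySem.Str.endswith s q = true then q else best) acc).length := by
  induction l generalizing acc with
  | nil => exact ⟨Or.inl rfl, by simp, le_refl _⟩
  | cons q rest ih =>
    simp only [List.foldl_cons]
    by_cases hc : PySem.Str.len acc < PySem.Str.len q ∧ PySem.Str.len q < PySem.Str.len s ∧
        PySem.Str.endswith s q = true
    · rw [if_pos hc]
      obtain ⟨hin, hmax, hmono⟩ := ih q
      have hgq : pvGood s q := by
        have t1 := hc.1
        have t2 := hc.2.1
        rw [pvStrLen, pvStrLen] at t1
        rw [pvStrLen, pvStrLen] at t2
        have e1 := pvLen_toList q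
        have e2 := pvLen_toList acc
        have e3 := pvLen_toList s
        exact ⟨by omega, by omega, hc.2.2⟩
      refine ⟨?_, ?_, ?_⟩
      · rcases hin with h | ⟨hm, hg⟩
        · exact Or.inr ⟨by rw [h]; exact List.mem_cons_self, by rw [h]; exact hgq⟩
        · exact Or.inr ⟨List.mem_cons_of_mem _ hm, hg⟩
      · intro x hx hgx
        rcases List.mem_cons.1 hx with rfl | hx'
        · exact hmono
        · exact hmax x hx' hgx
      · have : acc.length ≤ q.length := by
          have t1 := hc.1
          rw [pvStrLen, pvStrLen] at t1
          have e1 := pvLen_toList q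
          have e2 := pvLen_toList acc
          omega
        exact this.trans hmono
    · rw [if_neg hc]
      obtain ⟨hin, hmax, hmono⟩ := ih acc
      refine ⟨?_, ?_, hmono⟩
      · rcases hin with h | ⟨hm, hg⟩
        · exact Or.inl h
        · exact Or.inr ⟨List.mem_cons_of_mem _ hm, hg⟩
      · intro x hx hgx
        rcases List.mem_cons.1 hx with rfl | hx'
        · by_cases hlt : x.length ≤ acc.length
          · exact hlt.trans hmono
          · exfalso
            apply hc
            refine ⟨?_, ?_, hgx.2.2⟩
            · rw [pvStrLen, pvStrLen]
              have e1 := pvLen_toList x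
              have e2 := pvLen_toList acc
              omega
            · rw [pvStrLen, pvStrLen]
              have e1 := pvLen_toList x
              have e2 := pvLen_toList s
              have := hgx.2.1
              omega
        · exact hmax x hx' hgx

theorem pvBestFold_spec (s : String) (l : List String) :
    (pvBestFold s l = "" ∨ (pvBestFold s l ∈ l ∧ pvGood s (pvBestFold s l))) ∧
    (∀ q ∈ l, pvGood s q → q.length ≤ (pvBestFold s l).length) := by
  obtain ⟨h1, h2, _⟩ := pvFold_inv s l ""
  exact ⟨h1, h2⟩

-- find? produces a split of the list
theorem pvFind?_split {α : Type} (p : α → Bool) (l : List α) (a : α) (h : l.find? p = some a) :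
    p a = true ∧ ∃ l₁ l₂, l = l₁ ++ a :: l₂ ∧ ∀ x ∈ l₁, p x = false := by
  induction l with
  | nil => simp at h
  | cons x xs ih =>
    by_cases hx : p x = true
    · rw [List.find?_cons_of_pos hx] at h
      cases h
      exact ⟨hx, [], xs, rfl, by simp⟩
    · have hx' : p x = false := by
        cases hv : p x
        · rfl
        · exact absurd hv hx
      rw [List.find?_cons_of_neg (by simp [hx'])] at h
      obtain ⟨hpa, l₁, l₂, rfl, hall⟩ := ih h
      refine ⟨hpa, x :: l₁, l₂, rfl, ?_⟩
      intro y hy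
      rcases List.mem_cons.1 hy with rfl | hy'
      · exact hx'
      · exact hall y hy'

theorem pvNe_empty_of_good (s r : String) (h : pvGood s r) : r ≠ "" := by
  intro hr
  have := h.1
  rw [hr] at this
  simp at this

-- ===== VERDICT (by name: the statement is the Claim_ definition above) =====
theorem split_base_quote_spec : Claim_equal_split_base_quote := by
  intro sym allowed _
  unfold Spec_split_base_quote split_base_quote split_base_quote_alt
  set s := PySem.Str.replace (PySem.Str.replace (PySem.Str.replace (PySem.Str.upper sym) "-" "") "_" "") "/" "" with hs
  simp only
  set sl := PySem.List.sorted allowed (fun q => PySem.Str.len q) true with hsl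
  set r := pvBestFold s allowed with hr
  obtain ⟨hin, hmax⟩ := pvBestFold_spec s allowed
  rw [pvALoop_eq_find?]
  cases hf : sl.find? (fun q => decide (pvGood s q)) with
  | none =>
    have hnone : ∀ q ∈ allowed, ¬ pvGood s q := by
      intro q hq hg
      have hq' : q ∈ sl := by
        rw [hsl, PySem.List.mem_sorted]
        exact hq
      exact List.find?_eq_none.1 hf q hq' (decide_eq_true hg)
    have hre : r = "" := by
      rcases hin with h | ⟨hm, hg⟩
      · exact h
      · exact absurd hg (hnone _ hm)
    rw [if_pos hre]
  | some qA =>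
    obtain ⟨hpA, l₁, l₂, hsplit, hbefore⟩ := pvFind?_split _ sl qA hf
    have hgA : pvGood s qA := of_decide_eq_true hpA
    have hAmem : qA ∈ allowed := by
      rw [← PySem.List.mem_sorted (key := fun q => PySem.Str.len q) (rev := true), ← hsl]
      rw [hsplit]
      exact List.mem_append_right _ List.mem_cons_self
    -- qA has maximal length among the good elements
    have hpw : sl.Pairwise (fun a b => PySem.Str.len b ≤ PySem.Str.len a) :=
      PySem.List.sorted_pairwise_rev allowed (fun q => PySem.Str.len q)
    have hAmax : ∀ q ∈ allowed, pvGood s q → q.length ≤ qA.length := by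
      intro q hq hg
      have hq' : q ∈ sl := by
        rw [hsl, PySem.List.mem_sorted]; exact hq
      rw [hsplit] at hq' hpw
      rcases List.mem_append.1 hq' with h1 | h2
      · exact absurd (decide_eq_true hg) (by simp [hbefore q h1])
      · rcases List.mem_cons.1 h2 with rfl | h3
        · exact le_refl _
        · have := (List.pairwise_append.1 hpw).2.1
          have h4 := (List.pairwise_cons.1 this).1 q h3
          simpa using h4
    -- B's best is good, and of the same length as qA, hence equal to it
    have hrg : r ∈ allowed ∧ pvGood s r := by
      rcases hin with h | hgood
      · exfalso
        have h5 := hmax qA hAmem hgA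
        rw [h] at h5
        have h6 := hgA.1
        have h0 : ("" : String).length = 0 := rfl
        omega
      · exact hgood
    have hlen : r.length = qA.length :=
      le_antisymm (hAmax r hrg.1 hrg.2) (hmax qA hAmem hgA)
    have hreq : r = qA := pvGood_eq_of_length s r qA hrg.2 hgA hlen
    rw [if_neg (by simpa using pvNe_empty_of_good s r hrg.2), hreq]
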